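-- pv_equiv track=rewrite | github.com/dotcomaki/BSCS1002_Python | OPPE1Mock/1.py | twin_primes
-- ===== SOURCE A (Python) =====
-- def twin_primes(p, q):
--     count_p = 0
--     for i in range(1, p+1):
--         if p % i == 0:
--             count_p += 1
--     count_q = 0
--     for j in range(1, q+1):
--         if q % j == 0:
--             count_q += 1
--
--     if p > q:
--         diff = p - q
--     elif q > p:
--         diff = q - p
--
--     if count_p == 2 and count_q == 2 and diff == 2:
--         return True
--     else:
--         return False
-- ===== SOURCE B (Python) =====
-- def twin_primes(p, q):
--     def is_prime(n):
--         if n < 2: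
--             return False
--         i = 2
--         while i * i <= n:
--             if n % i == 0:
--                 return False
--             i += 1
--         return True
--     return is_prime(p) and is_prime(q) and abs(p - q) == 2
-- ===== Notes on version B (the rewrite author's own statement) =====
-- stated objective: faster
-- what changed: replaces counting all divisors of p and q by scanning 1..p and 1..q with trial division up to sqrt(n) plus a direct |p-q|==2 check; on p==q both prime (where A's unassigned 'diff' makes it raise UnboundLocalError, excluded by Pre_) B returns False
import Mathlib
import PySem

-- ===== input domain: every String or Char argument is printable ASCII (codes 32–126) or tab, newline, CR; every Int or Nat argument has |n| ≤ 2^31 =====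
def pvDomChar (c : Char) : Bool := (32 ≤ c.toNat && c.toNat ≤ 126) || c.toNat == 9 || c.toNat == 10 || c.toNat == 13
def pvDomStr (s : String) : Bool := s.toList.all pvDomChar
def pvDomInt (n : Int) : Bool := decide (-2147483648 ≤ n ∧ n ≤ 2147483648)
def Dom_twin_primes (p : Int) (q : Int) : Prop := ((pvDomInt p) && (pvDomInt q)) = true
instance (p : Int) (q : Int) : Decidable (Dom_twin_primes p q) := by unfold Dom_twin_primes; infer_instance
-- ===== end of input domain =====

-- B replaces A's O(p+q) divisor counting by trial division up to sqrt plus an |p-q|==2 check (faster).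
-- A raises UnboundLocalError when p == q and both prime ('diff' never assigned): excluded by Pre_; B returns False there.

-- ===== PORT A =====
-- 'diff' may be left unassigned in Python; ported as Option Int (none = unassigned).
-- Under Pre_ the 'none' case is never compared (the counts condition is already false).
def twin_primes (p : Int) (q : Int) : Bool :=
  let count_p : Int := (PySem.List.pyRange 1 (p + 1) 1).foldl
    (fun c i => if PySem.Int.mod p i == 0 then c + 1 else c) 0
  let count_q : Int := (PySem.List.pyRange 1 (q + 1) 1).foldl
    (fun c j => if PySem.Int.mod q j == 0 then c + 1 else c) 0
  let diff : Option Int := if p > q then some (p - q) else if q > p then some (q - p) else none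
  if count_p == 2 && count_q == 2 && diff == some 2 then true else false

-- ===== PORT B =====
-- the while loop of Source B's is_prime; the Nat argument is fuel bounding the iteration
-- count (the loop runs at most n - 1 times), so the recursion is structural
def pvTrial (n : Int) : Nat → Int → Bool
  | 0, _ => true
  | f + 1, i =>
    if i * i ≤ n then
      if PySem.Int.mod n i == 0 then false else pvTrial n f (i + 1)
    else true

def pvIsPrime (n : Int) : Bool :=
  if n < 2 then false else pvTrial n n.toNat 2

def twin_primes_alt (p : Int) (q : Int) : Bool :=
  pvIsPrime p && pvIsPrime q && (|p - q| == 2)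

-- ===== PRECONDITION & SPEC =====
-- Pre_ excludes exactly the inputs where A raises UnboundLocalError: p = q with p prime,
-- where 'diff' is never assigned yet is read (both divisor counts equal 2 there).
def Pre_twin_primes (p : Int) (q : Int) : Prop :=
  ¬ (p = q ∧ 2 ≤ p ∧ ∀ m : Nat, m < p.toNat → 2 ≤ m → ¬ m ∣ p.toNat)
instance (p : Int) (q : Int) : Decidable (Pre_twin_primes p q) := by unfold Pre_twin_primes; infer_instance
def pvWitness_twin_primes : Int × Int := (5, 7)

def Spec_twin_primes (p : Int) (q : Int) (out : Bool) : Prop := out = twin_primes_alt p q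
instance (p : Int) (q : Int) (out : Bool) : Decidable (Spec_twin_primes p q out) := by unfold Spec_twin_primes; infer_instance

-- ===== CLAIM (what is proved, stated in full; the proofs are below) =====
def Claim_equal_twin_primes : Prop := ∀ (p : Int) (q : Int), Dom_twin_primes p q → Pre_twin_primes p q → Spec_twin_primes p q (twin_primes p q)

-- ===== LEMMAS AND PROOFS =====

-- the counting foldl is a countP
theorem pvFoldlCount (P : Int → Bool) (l : List Int) (c : Int) :
    l.foldl (fun c i => if P i then c + 1 else c) c = c + (l.countP P : Int) := by
  induction l generalizing c with
  | nil => simp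
  | cons a t ih =>
      simp only [List.foldl_cons, List.countP_cons, ih]
      split <;> simp_all <;> omega

-- Nat primality as an Int statement about divisors strictly between 1 and p
theorem pvPrimeIffInt (p : Int) (hp : 2 ≤ p) :
    Nat.Prime p.toNat ↔ ∀ i : Int, 2 ≤ i → i < p → ¬ i ∣ p := by
  constructor
  · intro hpr i h2 hip hdvd
    have hi0 : i = ((i.toNat : Int)) := by omega
    have hp0 : p = ((p.toNat : Int)) := by omega
    have : i.toNat ∣ p.toNat := by
      rw [hi0, hp0] at hdvd; exact_mod_cast hdvd
    exact (Nat.prime_def_lt'.mp hpr).2 i.toNat (by omega) (by omega) this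
  · intro h
    refine Nat.prime_def_lt'.mpr ⟨by omega, fun m h2 hm hdvd => ?_⟩
    refine h (m : Int) (by exact_mod_cast h2) (by omega) ?_
    have hp0 : p = ((p.toNat : Int)) := by omega
    rw [hp0]; exact_mod_cast hdvd

-- A-side characterisation: the divisor count is 2 iff p is a prime ≥ 2
theorem pvCountChar (p : Int) :
    ((PySem.List.pyRange 1 (p + 1) 1).countP (fun i => PySem.Int.mod p i == 0) : Int) = 2 ↔
      (2 ≤ p ∧ Nat.Prime p.toNat) := by
  rcases lt_or_ge p 1 with h0 | h1
  · rw [PySem.List.pyRange_one_eq_nil (by omega)]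
    simp; omega
  · rcases eq_or_lt_of_le h1 with h1' | h2
    · subst h1'; simp; decide
    · -- p ≥ 2 : [1..p] = [1] ++ [2..p-1] ++ [p]
      rw [PySem.List.pyRange_one_cons (by omega : (1:Int) < p + 1),
          PySem.List.pyRange_one_succ_right (by omega : (1:Int) + 1 ≤ p)]
      simp only [List.countP_append, List.countP_cons, List.countP_nil]
      norm_num
      have hpd : PySem.Int.mod p p = 0 := (PySem.Int.mod_eq_zero_iff_dvd p p).mpr dvd_rfl
      rw [hpd, if_pos rfl]
      have hmid : ((PySem.List.pyRange 2 p 1).countP (fun i => PySem.Int.mod p i == 0) = 0) ↔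
          ∀ i : Int, 2 ≤ i → i < p → ¬ i ∣ p := by
        rw [List.countP_eq_zero]
        constructor
        · intro h i hi2 hip hdvd
          have hmem : i ∈ PySem.List.pyRange 2 p 1 := by
            rw [PySem.List.mem_pyRange_one]; omega
          have := h i hmem
          simp [PySem.Int.mod_eq_zero_iff_dvd] at this
          exact this hdvd
        · intro h i hmem
          rw [PySem.List.mem_pyRange_one] at hmem
          simp [PySem.Int.mod_eq_zero_iff_dvd]
          exact h i hmem.1 hmem.2
      rw [pvPrimeIffInt p (by omega)]
      constructor
      · intro hc
        refine ⟨by omega, hmid.mp ?_⟩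
        omega
      · intro ⟨_, hpr⟩
        have := hmid.mpr hpr
        omega

-- B-side loop characterisation (the fuel only needs to cover the remaining iterations)
theorem pvTrialChar (n : Int) : ∀ (f : Nat) (i : Int), 2 ≤ i → (n + 1 - i).toNat ≤ f →
    (pvTrial n f i = true ↔ ∀ m : Int, i ≤ m → m * m ≤ n → ¬ m ∣ n) := by
  intro f
  induction f with
  | zero =>
      intro i hi hf
      simp only [pvTrial, true_iff]
      intro m him hmm hdvd
      have hni : n < i := by omega
      nlinarith
  | succ f ih =>
      intro i hi hf
      rw [pvTrial]
      by_cases hle : i * i ≤ n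
      · rw [if_pos hle]
        have hin : i ≤ n := by nlinarith
        by_cases hmod : (PySem.Int.mod n i == 0) = true
        · rw [if_pos hmod]
          simp only [Bool.false_eq_true, false_iff]
          intro h
          exact h i (le_refl i) hle ((PySem.Int.mod_eq_zero_iff_dvd n i).mp (by simpa using hmod))
        · rw [if_neg hmod]
          rw [ih (i + 1) (by omega) (by omega)]
          constructor
          · intro h m him hmm hdvd
            by_cases hm : m = i
            · subst hm
              exact hmod (by simp [(PySem.Int.mod_eq_zero_iff_dvd n m).mpr hdvd])
            · exact h m (by omega) hmm hdvd
          · intro h m him hmm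
            exact h m (by omega) hmm
      · rw [if_neg hle]
        simp only [true_iff]
        intro m him hmm hdvd
        have : i * i ≤ m * m := by nlinarith
        omega

-- B-side characterisation: pvIsPrime decides primality of p.toNat for p ≥ 2
theorem pvIsPrimeChar (p : Int) : pvIsPrime p = true ↔ (2 ≤ p ∧ Nat.Prime p.toNat) := by
  unfold pvIsPrime
  rcases lt_or_ge p 2 with h | h
  · rw [if_pos h]; simp; omega
  · rw [if_neg (by omega), pvTrialChar p p.toNat 2 (le_refl 2) (by omega)]
    constructor
    · intro htr
      refine ⟨h, Nat.prime_def_le_sqrt.mpr ⟨by omega, fun m h2 hms hdvd => ?_⟩⟩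
      have hmm : (m : Int) * m ≤ p := by
        have := (Nat.le_sqrt.mp hms)
        have hmp : m * m ≤ p.toNat := this
        have : ((m * m : Nat) : Int) ≤ ((p.toNat : Int)) := by exact_mod_cast hmp
        push_cast at this; omega
      refine htr (m : Int) (by exact_mod_cast h2) hmm ?_
      have hp0 : p = ((p.toNat : Int)) := by omega
      rw [hp0]; exact_mod_cast hdvd
    · intro ⟨_, hpr⟩ m h2m hmm hdvd
      have h2m' : 2 ≤ m.toNat := by omega
      have hms : m.toNat ≤ Nat.sqrt p.toNat := by
        rw [Nat.le_sqrt]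
        have hm0 : m = ((m.toNat : Int)) := by omega
        have : ((m.toNat * m.toNat : Nat) : Int) ≤ ((p.toNat : Int)) := by
          push_cast; rw [← hm0]; omega
        exact_mod_cast this
      refine (Nat.prime_def_le_sqrt.mp hpr).2 m.toNat h2m' hms ?_
      have hm0 : m = ((m.toNat : Int)) := by omega
      have hp0 : p = ((p.toNat : Int)) := by omega
      rw [hm0, hp0] at hdvd; exact_mod_cast hdvd

theorem pvCountBool (p : Int) :
    (((PySem.List.pyRange 1 (p + 1) 1).foldl
      (fun c i => if PySem.Int.mod p i == 0 then c + 1 else c) 0 : Int) == 2) = pvIsPrime p := by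
  rw [pvFoldlCount]
  simp only [zero_add]
  cases hpi : pvIsPrime p
  · have hnot : ¬(2 ≤ p ∧ Nat.Prime p.toNat) := fun h => by
      rw [(pvIsPrimeChar p).mpr h] at hpi; simp at hpi
    have hne : ((PySem.List.pyRange 1 (p + 1) 1).countP
        (fun i => PySem.Int.mod p i == 0) : Int) ≠ 2 := fun h => hnot ((pvCountChar p).mp h)
    exact beq_eq_false_iff_ne.mpr hne
  · exact beq_iff_eq.mpr ((pvCountChar p).mpr ((pvIsPrimeChar p).mp hpi))

-- ===== VERDICT (by name: the statement is the Claim_ definition above) =====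
theorem twin_primes_spec : Claim_equal_twin_primes := by
  intro p q _ hpre
  unfold Spec_twin_primes twin_primes twin_primes_alt
  simp only [pvCountBool]
  rcases Bool.eq_false_or_eq_true (pvIsPrime p) with hp | hp <;>
    rcases Bool.eq_false_or_eq_true (pvIsPrime q) with hq | hq <;>
    simp only [hp, hq, Bool.false_and, Bool.and_false, Bool.true_and, Bool.and_true,
      Bool.false_eq_true] <;> try simp
  -- remaining: both prime
  have hpp := (pvIsPrimeChar p).mp hp
  have hqq := (pvIsPrimeChar q).mp hq
  have hne : p ≠ q := by
    intro h; subst h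
    exact hpre ⟨rfl, hpp.1, fun m hm h2 => (Nat.prime_def_lt'.mp hpp.2).2 m h2 hm⟩
  rcases lt_or_gt_of_ne hne with hlt | hgt
  · rw [if_neg (by omega), if_pos (by omega)]
    have : |p - q| = q - p := by rw [abs_sub_comm]; exact abs_of_pos (by omega)
    rw [this]
    rcases eq_or_ne (q - p) 2 with h2 | h2 <;> simp [h2]
  · rw [if_pos (by omega)]
    have : |p - q| = p - q := abs_of_pos (by omega)
    rw [this]
    rcases eq_or_ne (p - q) 2 with h2 | h2 <;> simp [h2]
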